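-- pv_equiv track=rewrite | github.com/spruceb/brainfuck | lisp_core.py | all_matched
-- ===== SOURCE A (Python) =====
-- def all_matched(code, chars=('(', ')')):
--     '''Check to see if all of the pairs (from `chars`) have matches'''
--     nest_count = 0
--     for c in code:
--         if c == chars[0]:
--             nest_count += 1
--         elif c == chars[1]:
--             nest_count -= 1
--     return nest_count == 0
-- ===== SOURCE B (Python) =====
-- def all_matched(code, chars=('(', ')')):
--     '''Check to see if all of the pairs (from `chars`) have matches'''
--     opens = sum(1 for c in code if c == chars[0])
--     closes = sum(1 for c in code if c == chars[1])
--     return opens == closes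
-- ===== Notes on version B (the rewrite author's own statement) =====
-- stated objective: alternative
-- what changed: Replaces the single signed running counter with two independent element-wise count passes compared at the end; Pre_ excludes the degenerate inputs where chars[0] == chars[1] and that character occurs in code, on which A's elif never decrements (A returns False) and either answer is as defensible as the other.
-- outside the precondition, e.g. on all_matched('((', ('(', '(')): A returns False, B returns True
import Mathlib
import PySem

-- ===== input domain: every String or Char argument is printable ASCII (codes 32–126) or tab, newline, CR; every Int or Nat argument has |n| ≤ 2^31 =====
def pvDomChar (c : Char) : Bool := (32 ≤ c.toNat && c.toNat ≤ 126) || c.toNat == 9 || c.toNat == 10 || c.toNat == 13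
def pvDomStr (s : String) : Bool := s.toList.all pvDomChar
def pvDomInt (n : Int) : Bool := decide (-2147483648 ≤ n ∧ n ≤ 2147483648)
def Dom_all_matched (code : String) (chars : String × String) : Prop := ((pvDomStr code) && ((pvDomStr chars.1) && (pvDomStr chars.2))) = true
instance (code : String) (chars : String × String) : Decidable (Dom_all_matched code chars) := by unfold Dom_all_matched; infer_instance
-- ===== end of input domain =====

-- B replaces A's single signed running counter with two independent count passes compared at the end (alternative decomposition, same cost).

-- ===== PORT A =====
-- A: one pass keeping a signed nest counter, +1 on chars[0], -1 (elif) on chars[1], result nest == 0.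
def all_matched (code : String) (chars : String × String) : Bool :=
  (code.toList.foldl (fun (nest_count : Int) c =>
      if String.ofList [c] == chars.1 then nest_count + 1
      else if String.ofList [c] == chars.2 then nest_count - 1
      else nest_count) 0) == 0

-- ===== PORT B =====
-- B: two independent element-wise count passes compared at the end.
def all_matched_alt (code : String) (chars : String × String) : Bool :=
  let opens := code.toList.countP (fun c => String.ofList [c] == chars.1)
  let closes := code.toList.countP (fun c => String.ofList [c] == chars.2)
  opens == closes

-- ===== PRECONDITION & SPEC =====
-- Pre_ excludes the degenerate inputs where chars.1 = chars.2 AND that character occurs in code: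
-- there A's elif never fires (every match only increments) and either answer is as defensible as the other.
def Pre_all_matched (code : String) (chars : String × String) : Prop :=
  chars.1 ≠ chars.2 ∨ ∀ c ∈ code.toList, String.ofList [c] ≠ chars.1
instance (code : String) (chars : String × String) : Decidable (Pre_all_matched code chars) := by unfold Pre_all_matched; infer_instance
def pvWitness_all_matched : String × (String × String) := ("(())", ("(", ")"))
def Spec_all_matched (code : String) (chars : String × String) (out : Bool) : Prop := out = all_matched_alt code chars
instance (code : String) (chars : String × String) (out : Bool) : Decidable (Spec_all_matched code chars out) := by unfold Spec_all_matched; infer_instance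

-- ===== CLAIM (what is proved, stated in full; the proofs are below) =====
def Claim_equal_all_matched : Prop := ∀ (code : String) (chars : String × String), Dom_all_matched code chars → Pre_all_matched code chars → Spec_all_matched code chars (all_matched code chars)

-- ===== LEMMAS AND PROOFS =====
-- When the opener and closer differ, A's fold from n equals n + opener count - closer count.
theorem all_matched_fold_eq (s t : String) (hst : s ≠ t) (l : List Char) (n : Int) :
    l.foldl (fun (nc : Int) c =>
      if String.ofList [c] == s then nc + 1
      else if String.ofList [c] == t then nc - 1
      else nc) n
    = n + (l.countP (fun c => String.ofList [c] == s) : Int)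
        - (l.countP (fun c => String.ofList [c] == t) : Int) := by
  induction l generalizing n with
  | nil => simp
  | cons c l ih =>
    simp only [List.foldl_cons, List.countP_cons]
    by_cases hs : (String.ofList [c] == s) = true
    · have ht' : (String.ofList [c] == t) = false := by
        simp only [beq_iff_eq] at hs
        rw [hs]
        exact beq_false_of_ne hst
      rw [if_pos hs, ih, hs, ht']
      simp only [if_true]
      push_cast; ring
    · have hs' : (String.ofList [c] == s) = false := by simpa using hs
      by_cases ht : (String.ofList [c] == t) = true
      · rw [if_neg hs, if_pos ht, ih, hs', ht]
        simp only [if_true]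
        push_cast; ring
      · have ht' : (String.ofList [c] == t) = false := by simpa using ht
        rw [if_neg hs, if_neg ht, ih, hs', ht']
        simp

-- When opener = closer and it never occurs, A's fold stays at n.
theorem all_matched_fold_no_match (s t : String) (l : List Char)
    (h : ∀ c ∈ l, String.ofList [c] ≠ s) (hst : s = t) (n : Int) :
    l.foldl (fun (nc : Int) c =>
      if String.ofList [c] == s then nc + 1
      else if String.ofList [c] == t then nc - 1
      else nc) n = n := by
  induction l generalizing n with
  | nil => rfl
  | cons c l ih =>
    have hc : (String.ofList [c] == s) = false := beq_false_of_ne (h c (List.mem_cons_self))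
    simp only [List.foldl_cons, hc, hst ▸ hc]
    exact ih (fun c hc => h c (List.mem_cons_of_mem _ hc)) n

-- ===== VERDICT (by name: the statement is the Claim_ definition above) =====
theorem all_matched_spec : Claim_equal_all_matched := by
  intro code chars _ hpre
  unfold Spec_all_matched all_matched all_matched_alt
  rcases hpre with hpre | hnone
  swap
  · by_cases heq : chars.1 = chars.2
    · rw [all_matched_fold_no_match chars.1 chars.2 code.toList hnone heq 0]
      have h1 : code.toList.countP (fun c => String.ofList [c] == chars.1) = 0 :=
        List.countP_eq_zero.mpr (fun c hc => by simpa using hnone c hc)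
      have h2 : code.toList.countP (fun c => String.ofList [c] == chars.2) = 0 :=
        List.countP_eq_zero.mpr (fun c hc => by simpa [← heq] using hnone c hc)
      simp [h1, h2]
    · rw [all_matched_fold_eq chars.1 chars.2 heq code.toList 0]
      by_cases hc : code.toList.countP (fun c => String.ofList [c] == chars.1)
          = code.toList.countP (fun c => String.ofList [c] == chars.2)
      · simp [hc]
      · simp [hc]
        omega
  rw [all_matched_fold_eq chars.1 chars.2 hpre code.toList 0]
  by_cases hc : code.toList.countP (fun c => String.ofList [c] == chars.1)
      = code.toList.countP (fun c => String.ofList [c] == chars.2)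
  · simp [hc]
  · simp [hc]
    omega
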